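-- pv_equiv track=rewrite | github.com/Soochol/WF_EOL_TESTER | src/infrastructure/implementation/hardware/digital_input/ajinextek/ajinextek_input.py | _group_consecutive_pins
-- ===== SOURCE A (Python) =====
-- from typing import Any, Callable, Dict, List, Optional
--
-- def _group_consecutive_pins(sorted_pins: List[int]) -> List[tuple[int, int]]:
--     """Group consecutive pins for batch reading optimization"""
--     if not sorted_pins:
--         return []
--
--     groups = []
--     start = sorted_pins[0]
--     count = 1
--
--     for i in range(1, len(sorted_pins)):
--         if sorted_pins[i] == sorted_pins[i - 1] + 1:
--             # Consecutive pin
--             count += 1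
--         else:
--             # Gap found, create group
--             if count >= 4:  # Only create groups for 4+ consecutive pins
--                 groups.append((start, count))
--             else:
--                 # Add individual pins for small groups
--                 for pin_offset in range(count):
--                     groups.append((start + pin_offset, 1))
--
--             start = sorted_pins[i]
--             count = 1
--
--     # Add the last group
--     if count >= 4:
--         groups.append((start, count))
--     else:
--         for pin_offset in range(count):
--             groups.append((start + pin_offset, 1))
--
--     return groups
-- ===== SOURCE B (Python) =====
-- def _group_consecutive_pins(sorted_pins):
--     """Group consecutive pins for batch reading optimization"""
--     n = len(sorted_pins)
--     # index-based: collect the positions where a new run begins, plus the end sentinel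
--     breaks = [i for i in range(n) if i == 0 or sorted_pins[i] != sorted_pins[i - 1] + 1] + [n]
--     out = []
--     for a, b in zip(breaks, breaks[1:]):
--         c = b - a
--         if c >= 4:
--             out.append((sorted_pins[a], c))
--         else:
--             out.extend((sorted_pins[a] + k, 1) for k in range(c))
--     return out
-- ===== Notes on version B (the rewrite author's own statement) =====
-- stated objective: alternative
-- what changed: Replaces A's stateful start/count scan with duplicated flush logic by index arithmetic: a comprehension over range(n) collects run-boundary positions, and zipping the boundary list with its own tail yields each run as an index interval (a,b) from which batches or singletons are emitted.
import Mathlib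
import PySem

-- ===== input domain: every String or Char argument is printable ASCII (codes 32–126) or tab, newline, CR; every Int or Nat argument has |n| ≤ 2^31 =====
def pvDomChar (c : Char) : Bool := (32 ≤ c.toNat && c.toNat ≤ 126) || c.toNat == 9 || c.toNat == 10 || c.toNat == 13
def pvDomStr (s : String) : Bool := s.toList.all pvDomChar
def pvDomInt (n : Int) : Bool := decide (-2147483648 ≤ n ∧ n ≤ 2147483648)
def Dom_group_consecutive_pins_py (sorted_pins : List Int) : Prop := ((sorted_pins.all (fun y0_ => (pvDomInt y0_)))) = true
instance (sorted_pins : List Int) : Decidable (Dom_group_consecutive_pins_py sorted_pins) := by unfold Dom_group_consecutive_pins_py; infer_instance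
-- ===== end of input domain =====

-- B replaces A's stateful start/count scan (with duplicated end-flush) by index arithmetic:
-- run-boundary positions via a comprehension, runs as intervals from zipping the boundary
-- list with its tail; return values proved equal on all inputs.

-- ===== PORT A =====
-- A's for-loop over i = 1..len-1, comparing sorted_pins[i] to sorted_pins[i-1]+1, as a
-- structural recursion over the tail carrying prev (= sorted_pins[i-1]), start, count, groups.
def pvGroupLoopA (rest : List Int) (prev start count : Int) (groups : List (Int × Int)) :
    List (Int × Int) :=
  match rest with
  | [] =>
      -- Add the last group
      if count ≥ 4 then groups ++ [(start, count)]
      else groups ++ (PySem.List.pyRange 0 count 1).map (fun off => (start + off, 1))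
  | x :: rest' =>
      if x = prev + 1 then
        pvGroupLoopA rest' x start (count + 1) groups
      else
        let flushed :=
          if count ≥ 4 then groups ++ [(start, count)]
          else groups ++ (PySem.List.pyRange 0 count 1).map (fun off => (start + off, 1))
        pvGroupLoopA rest' x x 1 flushed

def group_consecutive_pins_py (sorted_pins : List Int) : List (Int × Int) :=
  match sorted_pins with
  | [] => []
  | p :: rest => pvGroupLoopA rest p p 1 []

-- ===== PORT B =====
-- the comprehension's condition 'i == 0 or sorted_pins[i] != sorted_pins[i-1] + 1';
-- indices produced by range(n) are always in range, so the defaulted pyGetD is exact here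
def pvFlagB (xs : List Int) (i : Int) : Bool :=
  i == 0 || PySem.List.pyGetD xs i 0 != PySem.List.pyGetD xs (i - 1) 0 + 1

-- breaks = [i for i in range(n) if …] + [n]
def pvBreaksB (xs : List Int) : List Int :=
  (PySem.List.pyRange 0 xs.length 1).filter (pvFlagB xs) ++ [(xs.length : Int)]

-- the body of the 'for a, b in zip(breaks, breaks[1:])' loop, emitting one run's output
def pvEmitB (xs : List Int) (ab : Int × Int) : List (Int × Int) :=
  let c := ab.2 - ab.1
  if c ≥ 4 then [(PySem.List.pyGetD xs ab.1 0, c)]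
  else (PySem.List.pyRange 0 c 1).map (fun k => (PySem.List.pyGetD xs ab.1 0 + k, 1))

def group_consecutive_pins_py_alt (sorted_pins : List Int) : List (Int × Int) :=
  let breaks := pvBreaksB sorted_pins
  -- breaks[1:] is breaks.drop 1 (exact: start index 1 of a nonempty list)
  (breaks.zip (breaks.drop 1)).flatMap (pvEmitB sorted_pins)

-- ===== PRECONDITION & SPEC =====
def Spec_group_consecutive_pins_py (sorted_pins : List Int) (out : List (Int × Int)) : Prop := out = group_consecutive_pins_py_alt sorted_pins
instance (sorted_pins : List Int) (out : List (Int × Int)) : Decidable (Spec_group_consecutive_pins_py sorted_pins out) := by unfold Spec_group_consecutive_pins_py; infer_instance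

-- ===== CLAIM =====
def Claim_equal_group_consecutive_pins_py : Prop := ∀ (sorted_pins : List Int), Dom_group_consecutive_pins_py sorted_pins → Spec_group_consecutive_pins_py sorted_pins (group_consecutive_pins_py sorted_pins)

-- ===== LEMMAS AND PROOFS =====

theorem pvZipPairs_cons (a b : Int) (L : List Int) :
    ((a :: b :: L).zip ((a :: b :: L).drop 1)).flatMap f
      = f (a, b) ++ ((b :: L).zip ((b :: L).drop 1)).flatMap f := by
  simp [List.zip]

-- Loop invariant: A's loop at position j (1 ≤ j ≤ n), with the current run starting at
-- index j-c (value s) and prev = xs[j-1], equals groups ++ B's emission over the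
-- boundary suffix (j-c) :: filter (range j n) ++ [n].
theorem pvKey (xs : List Int) :
    ∀ (m j c : ℕ) (s : Int) (g : List (Int × Int)),
      j + m = xs.length → 1 ≤ j → 1 ≤ c → c ≤ j →
      xs.getD (j - c) 0 = s →
      pvGroupLoopA (xs.drop j) (xs.getD (j - 1) 0) s (c : Int) g
        = g ++ ((((j : Int) - (c : Int)) ::
            ((PySem.List.pyRange j xs.length 1).filter (pvFlagB xs) ++ [(xs.length : Int)])).zip
            ((((j : Int) - (c : Int)) ::
            ((PySem.List.pyRange j xs.length 1).filter (pvFlagB xs) ++ [(xs.length : Int)])).drop 1)).flatMap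
            (pvEmitB xs) := by
  intro m
  induction m with
  | zero =>
      intro j c s g hjm hj hc hcj hs
      have hjn : j = xs.length := by omega
      have hdrop : xs.drop j = [] := by simp [hjn]
      have hrange : PySem.List.pyRange (j : Int) xs.length 1 = [] := by
        exact PySem.List.pyRange_one_eq_nil (by omega)
      rw [hdrop, hrange]
      simp only [List.filter_nil, List.nil_append]
      have hzip : (((((j : Int) - (c : Int)) :: [(xs.length : Int)])).zip
          ((((j : Int) - (c : Int)) :: [(xs.length : Int)]).drop 1)).flatMap (pvEmitB xs)
          = pvEmitB xs (((j : Int) - (c : Int)), (xs.length : Int)) ++ [] := by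
        simp [List.zip]
      rw [hzip]
      simp only [List.append_nil]
      unfold pvGroupLoopA pvEmitB
      have hc' : ((xs.length : Int) - ((j : Int) - c)) = (c : Int) := by omega
      have hsx : PySem.List.pyGetD xs ((j : Int) - (c : Int)) 0 = s := by
        have : (j : Int) - (c : Int) = ((j - c : ℕ) : Int) := by omega
        rw [this, PySem.List.pyGetD_natCast]; exact hs
      simp only [hc', hsx]
      split <;> simp
  | succ m ih =>
      intro j c s g hjm hj hc hcj hs
      have hjn : j < xs.length := by omega
      have hdrop : xs.drop j = xs[j] :: xs.drop (j + 1) := by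
        rw [List.getElem_cons_drop]
      have hrange : PySem.List.pyRange (j : Int) xs.length 1
          = (j : Int) :: PySem.List.pyRange ((j : Int) + 1) xs.length 1 := by
        exact PySem.List.pyRange_one_cons (by exact_mod_cast hjn)
      have hprev : xs.getD (j - 1) 0 = xs[j - 1]'(by omega) := by
        rw [List.getD_eq_getElem?_getD, List.getElem?_eq_getElem (by omega)]; rfl
      have hjne : (j : Int) ≠ 0 := by omega
      have h1 : PySem.List.pyGetD xs (j : Int) 0 = xs[j] := by
        rw [PySem.List.pyGetD_natCast, List.getD_eq_getElem?_getD,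
          List.getElem?_eq_getElem hjn]; rfl
      have h2 : PySem.List.pyGetD xs ((j : Int) - 1) 0 = xs[j-1]'(by omega) := by
        have : (j : Int) - 1 = ((j - 1 : ℕ) : Int) := by omega
        rw [this, PySem.List.pyGetD_natCast, List.getD_eq_getElem?_getD,
          List.getElem?_eq_getElem (by omega)]; rfl
      rw [hdrop]
      unfold pvGroupLoopA
      rw [hprev, hrange]
      by_cases hcase : xs[j] = (xs[j-1]'(by omega)) + 1
      · -- consecutive: flag false, continue run
        have hff : ¬ (pvFlagB xs (j : Int) = true) := by
          unfold pvFlagB; simp [h1, h2, hcase]; omega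
        rw [if_pos hcase, List.filter_cons, if_neg hff]
        have := ih (j + 1) (c + 1) s g (by omega) (by omega) (by omega) (by omega)
          (by have : j + 1 - (c + 1) = j - c := by omega
              rw [this]; exact hs)
        have e1 : ((j + 1 : ℕ) : Int) - ((c + 1 : ℕ) : Int) = (j : Int) - c := by
          push_cast; ring
        have e2 : (j + 1 : ℕ) - 1 = j := by omega
        have e3 : xs.getD j 0 = xs[j] := by
          rw [List.getD_eq_getElem?_getD, List.getElem?_eq_getElem hjn]; rfl
        rw [e2, e3] at this
        rw [e1, Nat.cast_add, Nat.cast_one] at this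
        convert this using 3
      · -- gap: flag true, flush run (j-c, j) then restart at j
        have hft : pvFlagB xs (j : Int) = true := by
          unfold pvFlagB; simp [h1, h2, hcase]
        rw [if_neg hcase, List.filter_cons, if_pos hft]
        rw [List.cons_append, pvZipPairs_cons]
        have hemit : pvEmitB xs ((j : Int) - c, (j : Int))
            = (if (c : Int) ≥ 4 then [(s, (c : Int))]
               else (PySem.List.pyRange 0 c 1).map (fun off => (s + off, 1))) := by
          unfold pvEmitB
          have hc' : ((j : Int) - ((j : Int) - c)) = (c : Int) := by omega
          have hsx : PySem.List.pyGetD xs ((j : Int) - (c : Int)) 0 = s := by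
            have : (j : Int) - (c : Int) = ((j - c : ℕ) : Int) := by omega
            rw [this, PySem.List.pyGetD_natCast]; exact hs
          simp only [hc', hsx]
        have := ih (j + 1) 1 xs[j]
          (g ++ (if (c : Int) ≥ 4 then [(s, (c : Int))]
                 else (PySem.List.pyRange 0 c 1).map (fun off => (s + off, 1))))
          (by omega) (by omega) (by omega) (by omega)
          (by have : j + 1 - 1 = j := by omega
              rw [this, List.getD_eq_getElem?_getD, List.getElem?_eq_getElem hjn]; rfl)
        have e2 : (j + 1 : ℕ) - 1 = j := by omega
        have e3 : xs.getD j 0 = xs[j] := by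
          rw [List.getD_eq_getElem?_getD, List.getElem?_eq_getElem hjn]; rfl
        rw [e2, e3] at this
        have e1 : ((j + 1 : ℕ) : Int) - ((1 : ℕ) : Int) = (j : Int) := by
          push_cast; ring
        rw [e1, Nat.cast_one] at this
        push_cast at this
        have hpush : (if (c : Int) ≥ 4 then g ++ [(s, (c : Int))]
              else g ++ (PySem.List.pyRange 0 c 1).map (fun off => (s + off, 1)))
            = g ++ (if (c : Int) ≥ 4 then [(s, (c : Int))]
              else (PySem.List.pyRange 0 c 1).map (fun off => (s + off, 1))) := by
          split <;> simp
        show pvGroupLoopA (xs.drop (j + 1)) xs[j] xs[j] 1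
            (if (c : Int) ≥ 4 then g ++ [(s, (c : Int))]
             else g ++ (PySem.List.pyRange 0 c 1).map (fun off => (s + off, 1))) = _
        rw [hpush, this, hemit, List.append_assoc]

-- ===== VERDICT =====
theorem group_consecutive_pins_py_spec : Claim_equal_group_consecutive_pins_py := by
  intro sorted_pins _
  unfold Spec_group_consecutive_pins_py
  cases sorted_pins with
  | nil =>
      simp [group_consecutive_pins_py, group_consecutive_pins_py_alt, pvBreaksB,
        PySem.List.pyRange_one_eq_nil]
  | cons p rest =>
      have hkey := pvKey (p :: rest) rest.length 1 1 p []
        (by simp [Nat.add_comm]) (le_refl 1) (le_refl 1) (le_refl 1) (by rfl)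
      have hdrop1 : (p :: rest).drop 1 = rest := rfl
      have hget0 : (p :: rest).getD 0 0 = p := rfl
      simp only [Nat.sub_self] at hkey
      rw [hdrop1, hget0] at hkey
      rw [show ((1:ℕ):Int) - ((1:ℕ):Int) = (0:Int) by norm_num] at hkey
      show pvGroupLoopA rest p p 1 [] = _
      unfold group_consecutive_pins_py_alt pvBreaksB
      have hlen : (0 : Int) < ((p :: rest).length : Int) := by simp
      rw [PySem.List.pyRange_one_cons hlen]
      have hf0 : pvFlagB (p :: rest) 0 = true := by unfold pvFlagB; simp
      rw [List.filter_cons, if_pos hf0]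
      simpa using hkey
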